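-- pv_equiv track=rewrite | github.com/PedroGabrielBHZ/strings_images_processing_esiee | TP_1/q3.py | compute_max_overlap
-- ===== SOURCE A (Python) =====
-- def compute_max_overlap(u, v):
--     """Compute the maximum overlap between the suffix of u and the prefix of v using KMP failure function."""
--     string = v + '#' + u  # Concatenate v, a separator, and u
--     lps = [0] * len(string)
--     for i in range(1, len(string)):
--         length = lps[i - 1]
--         while length > 0 and string[i] != string[length]:
--             length = lps[length - 1]
--         if string[i] == string[length]:
--             length += 1
--         lps[i] = length
--     return lps[-1]  # The last value of lps gives the maximum overlap
-- ===== SOURCE B (Python) =====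
-- def compute_max_overlap(u, v):
--     """Max overlap of u's suffix with v's prefix: longest proper border of v + '#' + u,
--     found by direct downward scan instead of the KMP failure-function recurrence."""
--     s = v + '#' + u
--     n = len(s)
--     for k in range(n - 1, 0, -1):
--         if s[:k] == s[n - k:]:
--             return k
--     return 0
-- ===== Notes on version B (the rewrite author's own statement) =====
-- stated objective: alternative
-- what changed: Replaces the KMP failure-function (lps) recurrence by a direct downward scan for the longest proper border of v + '#' + u, returning the first k with s[:k] == s[n-k:].
import Mathlib
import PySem

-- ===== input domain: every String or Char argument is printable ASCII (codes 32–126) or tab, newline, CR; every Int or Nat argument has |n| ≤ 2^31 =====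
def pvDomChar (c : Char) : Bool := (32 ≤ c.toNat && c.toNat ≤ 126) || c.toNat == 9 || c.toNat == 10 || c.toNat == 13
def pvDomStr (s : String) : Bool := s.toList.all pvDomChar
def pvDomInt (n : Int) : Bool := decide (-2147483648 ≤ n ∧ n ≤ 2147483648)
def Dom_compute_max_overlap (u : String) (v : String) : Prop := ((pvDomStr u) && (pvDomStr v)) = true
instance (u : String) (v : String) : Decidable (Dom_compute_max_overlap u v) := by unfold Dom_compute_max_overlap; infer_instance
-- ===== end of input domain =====

-- B replaces A's KMP failure-function (lps) recurrence by a direct downward scan for the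
-- longest proper border of v + '#' + u (objective: alternative algorithm, not faster).

-- ===== PORT A =====
-- the inner `while length > 0 and string[i] != string[length]` loop; fuel = len(string)
-- always suffices (length strictly decreases), proved in the lemmas below
def kmpInner (s : List Char) (lps : List Nat) (c : Char) (len : Nat) : Nat → Nat
  | 0 => len
  | fuel + 1 =>
    if 0 < len ∧ s.getD len ' ' ≠ c then
      kmpInner s lps c (lps.getD (len - 1) 0) fuel
    else len

-- one iteration of `for i in range(1, len(string))`, setting lps[i] = length
def kmpStep (s : List Char) (lps : List Nat) (i : Nat) : List Nat :=
  let len := kmpInner s lps (s.getD i ' ') (lps.getD (i - 1) 0) s.length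
  let len := if s.getD i ' ' = s.getD len ' ' then len + 1 else len
  lps ++ [len]

-- lps = [0]*n then filled left to right (the untouched tail zeros are never read)
def kmpLps (s : List Char) : List Nat :=
  (List.range' 1 (s.length - 1)).foldl (kmpStep s) [0]

def compute_max_overlap (u : String) (v : String) : Int :=
  let s := v.toList ++ '#' :: u.toList   -- string = v + '#' + u
  Int.ofNat ((kmpLps s).getLast?.getD 0) -- lps[-1]; s is never empty

-- ===== PORT B =====
-- for k in range(n-1, 0, -1): if s[:k] == s[n-k:]: return k;  return 0
def bruteBorder (s : List Char) : Nat → Nat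
  | 0 => 0
  | k + 1 =>
    if s.take (k + 1) = s.drop (s.length - (k + 1)) then k + 1
    else bruteBorder s k

def compute_max_overlap_alt (u : String) (v : String) : Int :=
  let s := v.toList ++ '#' :: u.toList
  Int.ofNat (bruteBorder s (s.length - 1))

-- ===== PRECONDITION & SPEC =====
def Spec_compute_max_overlap (u : String) (v : String) (out : Int) : Prop := out = compute_max_overlap_alt u v
instance (u : String) (v : String) (out : Int) : Decidable (Spec_compute_max_overlap u v out) := by unfold Spec_compute_max_overlap; infer_instance

-- ===== CLAIM (what is proved, stated in full; the proofs are below) =====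
def Claim_equal_compute_max_overlap : Prop := ∀ (u : String) (v : String), Dom_compute_max_overlap u v → Spec_compute_max_overlap u v (compute_max_overlap u v)

-- ===== LEMMAS AND PROOFS =====

-- the longest proper border of t (0 if none): greatest k < |t| with take k t a suffix of t
def mb (t : List Char) : Nat :=
  Nat.findGreatest (fun k => k < t.length ∧ t.take k <:+ t) t.length

-- "good" k: the border take k t extended by character c still matches
def Good (t : List Char) (c : Char) (k : Nat) : Prop :=
  k < t.length ∧ t.take k <:+ t ∧ t.getD k ' ' = c

lemma take_getD (s : List Char) (i j : Nat) (d : Char) (h : j < i) :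
    (s.take i).getD j d = s.getD j d := by
  simp [List.getD_eq_getElem?_getD, List.getElem?_take_of_lt h]

lemma take_succ_eq (s : List Char) (i : Nat) (h : i < s.length) :
    s.take (i + 1) = s.take i ++ [s.getD i ' '] := by
  rw [List.take_add_one, List.getElem?_eq_getElem h]
  simp [List.getD_eq_getElem?_getD, List.getElem?_eq_getElem h]

lemma suffix_concat_iff (y t : List Char) (e c : Char) :
    y ++ [e] <:+ t ++ [c] ↔ y <:+ t ∧ e = c := by
  rw [← List.reverse_prefix]
  simp only [List.reverse_append, List.reverse_singleton, List.singleton_append,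
    List.cons_prefix_cons, List.reverse_prefix]
  tauto

lemma bord_zero (t : List Char) (h : t ≠ []) : 0 < t.length ∧ t.take 0 <:+ t :=
  ⟨List.length_pos_of_ne_nil h, by simp⟩

lemma mb_bord (t : List Char) (h : t ≠ []) :
    mb t < t.length ∧ t.take (mb t) <:+ t := by
  unfold mb
  exact Nat.findGreatest_spec (P := fun k => k < t.length ∧ t.take k <:+ t)
    (n := t.length) (Nat.zero_le _) (bord_zero t h)

lemma mb_max (t : List Char) (k : Nat) (hk : k < t.length) (hs : t.take k <:+ t) :
    k ≤ mb t :=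
  Nat.le_findGreatest (le_of_lt hk) ⟨hk, hs⟩

lemma mb_lt (t : List Char) (h : t ≠ []) : mb t < t.length := (mb_bord t h).1

lemma take_of_take {t : List Char} {k j : Nat} (hj : j ≤ k) :
    (t.take k).take j = t.take j := by
  rw [List.take_take, min_eq_left hj]

-- borders of t ++ [c] at a successor are exactly the Good k
lemma bord_concat_succ (t : List Char) (c : Char) (k : Nat) :
    ((k + 1 < (t ++ [c]).length ∧ (t ++ [c]).take (k + 1) <:+ (t ++ [c])) ↔ Good t c k) := by
  unfold Good
  constructor
  · rintro ⟨hlen, hsuf⟩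
    have hk : k < t.length := by simpa using hlen
    rw [List.take_append, Nat.sub_eq_zero_of_le (by omega), List.take_zero, List.append_nil,
      take_succ_eq t k hk] at hsuf
    rw [suffix_concat_iff] at hsuf
    exact ⟨hk, hsuf.1, hsuf.2⟩
  · rintro ⟨hk, hsuf, hc⟩
    refine ⟨by simp; omega, ?_⟩
    rw [List.take_append, Nat.sub_eq_zero_of_le (by omega), List.take_zero, List.append_nil,
      take_succ_eq t k hk, suffix_concat_iff]
    exact ⟨hsuf, hc⟩

lemma mb_concat_pos (t : List Char) (c : Char) (m : Nat)
    (hG : Good t c m) (hmax : ∀ k, Good t c k → k ≤ m) :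
    mb (t ++ [c]) = m + 1 := by
  have hle : m + 1 ≤ (t ++ [c]).length := by
    have := hG.1; simp; omega
  have h1 : m + 1 ≤ mb (t ++ [c]) :=
    Nat.le_findGreatest hle ((bord_concat_succ t c m).2 hG)
  have h2 : mb (t ++ [c]) ≤ m + 1 := by
    have hne : t ++ [c] ≠ [] := by simp
    rcases hmb : mb (t ++ [c]) with _ | j
    · omega
    · have hb := mb_bord (t ++ [c]) hne
      rw [hmb] at hb
      have := hmax j ((bord_concat_succ t c j).1 hb)
      omega
  omega

lemma mb_concat_zero (t : List Char) (c : Char)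
    (hnone : ∀ k, ¬ Good t c k) : mb (t ++ [c]) = 0 := by
  rw [mb, Nat.findGreatest_eq_zero_iff]
  intro n hn hle hb
  rcases n with _ | j
  · omega
  · exact hnone j ((bord_concat_succ t c j).1 hb)

-- the while loop: from a border `len` of s.take i with no good k above it,
-- it reaches the largest good k (or 0, with the final character test failing)
lemma while_spec (s : List Char) (lps : List Nat) (i : Nat)
    (hi : 1 ≤ i) (hin : i < s.length)
    (hlps : ∀ j, j < i → lps.getD j 0 = mb (s.take (j + 1))) :
    ∀ fuel len, len < fuel → len < i → s.take len <:+ s.take i →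
      (∀ k, len < k → ¬ Good (s.take i) (s.getD i ' ') k) →
      (kmpInner s lps (s.getD i ' ') len fuel < i ∧
       s.take (kmpInner s lps (s.getD i ' ') len fuel) <:+ s.take i ∧
       (∀ k, kmpInner s lps (s.getD i ' ') len fuel < k → ¬ Good (s.take i) (s.getD i ' ') k) ∧
       (kmpInner s lps (s.getD i ' ') len fuel = 0 ∨
        s.getD (kmpInner s lps (s.getD i ' ') len fuel) ' ' = s.getD i ' ')) := by
  have hti : (s.take i).length = i := by simp; omega
  intro fuel
  induction fuel with
  | zero => intro len h; omega
  | succ f ih =>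
    intro len hfuel hlen hsuf hup
    rw [kmpInner]
    by_cases hcond : 0 < len ∧ s.getD len ' ' ≠ s.getD i ' '
    · rw [if_pos hcond]
      -- len' = lps[len-1] = mb (s.take len), a strictly smaller border
      have hstep : lps.getD (len - 1) 0 = mb (s.take len) := by
        have := hlps (len - 1) (by omega)
        rwa [Nat.sub_add_cancel hcond.1] at this
      have htll : (s.take len).length = len := by simp; omega
      have htlne : s.take len ≠ [] := by
        intro hnil; rw [hnil] at htll; simp at htll; omega
      have hblt : mb (s.take len) < len := by
        have := mb_lt (s.take len) htlne; omega
      have hb2 : s.take (mb (s.take len)) <:+ s.take len := by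
        have := (mb_bord (s.take len) htlne).2
        rwa [take_of_take (le_of_lt hblt)] at this
      apply ih
      · omega
      · omega
      · rw [hstep]; exact hb2.trans hsuf
      · -- no good k above mb (s.take len)
        rw [hstep]
        intro k hk hG
        have hk1 : k < i := by have := hG.1; omega
        have hk2 : s.take k <:+ s.take i := by
          have := hG.2.1; rwa [take_of_take (le_of_lt hk1)] at this
        have hk3 : s.getD k ' ' = s.getD i ' ' := by
          have := hG.2.2; rwa [take_getD s i k ' ' hk1] at this
        by_cases hkl : len < k
        · exact hup k hkl hG
        · rcases Nat.lt_or_ge k len with hklt | hkge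
          · -- k is a border of s.take len, so k ≤ mb (s.take len)
            have hkk : s.take k <:+ s.take len :=
              List.suffix_of_suffix_length_le hk2 hsuf (by
                simp only [List.length_take]; omega)
            have : k ≤ mb (s.take len) := by
              apply mb_max
              · omega
              · rwa [take_of_take (le_of_lt hklt)]
            omega
          · -- k = len: the loop condition says s[len] ≠ s[i]
            have hkeq : k = len := by omega
            rw [hkeq] at hk3
            exact hcond.2 hk3
    · rw [if_neg hcond]
      push_neg at hcond
      refine ⟨hlen, hsuf, hup, ?_⟩
      rcases Nat.eq_zero_or_pos len with h0 | hpos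
      · exact Or.inl h0
      · exact Or.inr (not_not.mp (by intro h; exact h (hcond hpos)))

-- one outer iteration appends mb of the next prefix
lemma step_spec (s : List Char) (lps : List Nat) (i : Nat)
    (hi : 1 ≤ i) (hin : i < s.length)
    (hlps : ∀ j, j < i → lps.getD j 0 = mb (s.take (j + 1))) :
    kmpStep s lps i = lps ++ [mb (s.take (i + 1))] := by
  have hti : (s.take i).length = i := by simp; omega
  have htne : s.take i ≠ [] := by
    intro hnil; rw [hnil] at hti; simp at hti; omega
  have hlen0 : lps.getD (i - 1) 0 = mb (s.take i) := by
    have := hlps (i - 1) (by omega)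
    rwa [Nat.sub_add_cancel hi] at this
  have hmlt : mb (s.take i) < i := by have := mb_lt (s.take i) htne; omega
  have hmsuf : s.take (mb (s.take i)) <:+ s.take i := by
    have := (mb_bord (s.take i) htne).2
    rwa [take_of_take (le_of_lt hmlt)] at this
  have hup0 : ∀ k, mb (s.take i) < k → ¬ Good (s.take i) (s.getD i ' ') k := by
    intro k hk hG
    have := mb_max (s.take i) k hG.1 hG.2.1
    omega
  have hw := while_spec s lps i hi hin hlps s.length (lps.getD (i - 1) 0)
    (by omega) (by omega)
    (by rw [hlen0]; exact hmsuf) (by rw [hlen0]; exact hup0)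
  simp only [kmpStep]
  set r := kmpInner s lps (s.getD i ' ') (lps.getD (i - 1) 0) s.length with hr
  obtain ⟨hr1, hr2, hr3, hr4⟩ := hw
  congr 1
  rw [take_succ_eq s i hin]
  by_cases heq : s.getD i ' ' = s.getD r ' '
  · rw [if_pos heq]
    have hGr : Good (s.take i) (s.getD i ' ') r :=
      ⟨by omega, by rwa [take_of_take (le_of_lt hr1)],
       by rw [take_getD s i r ' ' hr1]; exact heq.symm⟩
    have hmax : ∀ k, Good (s.take i) (s.getD i ' ') k → k ≤ r := by
      intro k hG
      by_contra hlt
      exact hr3 k (by omega) hG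
    show [r + 1] = [mb (List.take i s ++ [s.getD i ' '])]
    rw [mb_concat_pos (s.take i) (s.getD i ' ') r hGr hmax]
  · rw [if_neg heq]
    have hr0 : r = 0 := by
      rcases hr4 with h | h
      · exact h
      · exact absurd h.symm heq
    have hnone : ∀ k, ¬ Good (s.take i) (s.getD i ' ') k := by
      intro k hG
      rcases Nat.eq_zero_or_pos k with hk0 | hkp
      · rcases hG with ⟨hk1, _, hk3⟩
        rw [hti] at hk1
        rw [hk0, take_getD s i 0 ' ' (by omega)] at hk3
        rw [← hr0] at hk3
        exact heq hk3.symm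
      · exact hr3 k (by omega) hG
    show [r] = [mb (List.take i s ++ [s.getD i ' '])]
    rw [mb_concat_zero (s.take i) (s.getD i ' ') hnone, hr0]

lemma lps_aux (s : List Char) (hs : s ≠ []) :
    ∀ m, m ≤ s.length - 1 →
      (List.range' 1 m).foldl (kmpStep s) [0] =
        (List.range (m + 1)).map (fun j => mb (s.take (j + 1))) := by
  have hn : 0 < s.length := List.length_pos_of_ne_nil hs
  intro m
  induction m with
  | zero =>
    intro _
    have h1 : (s.take 1).length = 1 := by simp; omega
    have : mb (s.take 1) = 0 := by
      have := mb_lt (s.take 1) (by intro hnil; rw [hnil] at h1; simp at h1)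
      omega
    simp [this]
  | succ m ih =>
    intro hm
    have hrange : List.range' 1 (m + 1) = List.range' 1 m ++ [1 + m] := by
      simpa using List.range'_concat (step := 1) (s := 1) (n := m)
    rw [hrange, List.foldl_append, ih (by omega)]
    simp only [List.foldl_cons, List.foldl_nil]
    have hgd : ∀ j, j < m + 1 →
        ((List.range (m + 1)).map (fun j => mb (s.take (j + 1)))).getD j 0 =
          mb (s.take (j + 1)) := by
      intro j hj
      simp [List.getD_eq_getElem?_getD, List.getElem?_map, List.getElem?_range hj]
    have hstep := step_spec s ((List.range (m + 1)).map (fun j => mb (s.take (j + 1))))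
      (m + 1) (by omega) (by omega) (fun j hj => hgd j hj)
    rw [show 1 + m = m + 1 by omega, hstep]
    simp [List.range_succ]

lemma bruteBorder_findGreatest (s : List Char) (k : Nat) :
    bruteBorder s k = Nat.findGreatest (fun j => s.take j = s.drop (s.length - j)) k := by
  induction k with
  | zero => rfl
  | succ k ih => rw [bruteBorder, Nat.findGreatest_succ, ih]

lemma findGreatest_congr (P Q : Nat → Prop) [DecidablePred P] [DecidablePred Q] :
    ∀ b, (∀ k, k ≤ b → (P k ↔ Q k)) → Nat.findGreatest P b = Nat.findGreatest Q b := by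
  intro b
  induction b with
  | zero => intro _; rfl
  | succ b ih =>
    intro h
    rw [Nat.findGreatest_succ, Nat.findGreatest_succ, ih (fun k hk => h k (by omega))]
    by_cases hp : P (b + 1)
    · rw [if_pos hp, if_pos ((h (b + 1) le_rfl).mp hp)]
    · rw [if_neg hp, if_neg (fun hq => hp ((h (b + 1) le_rfl).mpr hq))]

lemma bruteBorder_eq (s : List Char) (hs : s ≠ []) :
    bruteBorder s (s.length - 1) = mb s := by
  have hn : 0 < s.length := List.length_pos_of_ne_nil hs
  rw [bruteBorder_findGreatest, mb]
  obtain ⟨n, hn'⟩ : ∃ n, s.length = n + 1 := ⟨s.length - 1, by omega⟩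
  rw [hn', Nat.add_sub_cancel, Nat.findGreatest_succ, if_neg (by rintro ⟨h, -⟩; omega)]
  apply findGreatest_congr
  intro k hk
  constructor
  · intro h
    refine ⟨by omega, ?_⟩
    rw [h]; exact List.drop_suffix _ _
  · rintro ⟨-, hsuf⟩
    have := List.suffix_iff_eq_drop.mp hsuf
    rwa [List.length_take, hn', min_eq_left (by omega)] at this

lemma kmp_eq_mb (s : List Char) (hs : s ≠ []) :
    (kmpLps s).getLast?.getD 0 = mb s := by
  have hn : 0 < s.length := List.length_pos_of_ne_nil hs
  rw [kmpLps, lps_aux s hs (s.length - 1) le_rfl]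
  rw [show (s.length - 1) + 1 = s.length by omega]
  rw [show s.length = (s.length - 1) + 1 by omega, List.range_succ, List.map_append]
  simp [show (s.length - 1) + 1 = s.length by omega, List.take_length]

-- ===== VERDICT (by name: the statement is the Claim_ definition above) =====
theorem compute_max_overlap_spec : Claim_equal_compute_max_overlap := by
  intro u v _
  have hs : v.toList ++ '#' :: u.toList ≠ [] := by simp
  show Int.ofNat ((kmpLps (v.toList ++ '#' :: u.toList)).getLast?.getD 0) =
    Int.ofNat (bruteBorder (v.toList ++ '#' :: u.toList) ((v.toList ++ '#' :: u.toList).length - 1))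
  rw [kmp_eq_mb _ hs, bruteBorder_eq _ hs]
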